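-- pv_equiv track=rewrite | github.com/Montabos/Quantis | code_interpreter/services/decision_analyzer.py | _translate_metric_name
-- ===== SOURCE A (Python) =====
-- def _translate_metric_name(name: str) -> str:
--     """Translate English metric names to French"""
--     translations = {
--         "total_cost": "coût_total",
--         "payback_period": "période_de_retour",
--         "operating_costs": "coûts_exploitation",
--         "break_even_point": "seuil_de_rentabilité",
--         "return_on_investment": "retour_sur_investissement",
--         "estimated_increase_in_revenue": "augmentation_estimée_revenus",
--         "estimated_increase_in_production": "augmentation_estimée_production",
--         "cash_impact": "impact_trésorerie",
--         "gain_mensuel": "gain_mensuel",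
--         "coût_mensuel": "coût_mensuel",
--     }
--
--     # If already in French or not in translation dict, return as-is
--     if name in translations:
--         return translations[name]
--
--     # If name contains underscores and looks English, try to translate common words
--     if "_" in name:
--         parts = name.split("_")
--         translated_parts = []
--         for part in parts:
--             if part in translations:
--                 translated_parts.append(translations[part])
--             else:
--                 translated_parts.append(part)
--         return "_".join(translated_parts)
--
--     return name
-- ===== SOURCE B (Python) =====
-- def _translate_metric_name(name: str) -> str:
--     """Translate English metric names to French"""
--     # Direct comparison chain: no dictionary structure at all.  Every key of
--     # A's dict contains "_" while no token of name.split("_") can contain "_",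
--     # so A's word-by-word branch is inert and only the exact-match lookup
--     # matters; a flat chain of equality tests reproduces it.
--     if name == "total_cost":
--         return "coût_total"
--     elif name == "payback_period":
--         return "période_de_retour"
--     elif name == "operating_costs":
--         return "coûts_exploitation"
--     elif name == "break_even_point":
--         return "seuil_de_rentabilité"
--     elif name == "return_on_investment":
--         return "retour_sur_investissement"
--     elif name == "estimated_increase_in_revenue":
--         return "augmentation_estimée_revenus"
--     elif name == "estimated_increase_in_production":
--         return "augmentation_estimée_production"
--     elif name == "cash_impact":
--         return "impact_trésorerie"
--     else:
--         # "gain_mensuel" and "coût_mensuel" map to themselves, as does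
--         # every untranslated name.
--         return name
-- ===== Notes on version B (the rewrite author's own statement) =====
-- stated objective: alternative
-- what changed: Replaced A's per-call dict construction, membership test and word-by-word underscore-splitting loop by a flat equality-comparison chain over the eight non-identity translations, after observing that every dict key contains an underscore so the per-word loop never translates a token and the two identity entries are redundant.
import Mathlib
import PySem

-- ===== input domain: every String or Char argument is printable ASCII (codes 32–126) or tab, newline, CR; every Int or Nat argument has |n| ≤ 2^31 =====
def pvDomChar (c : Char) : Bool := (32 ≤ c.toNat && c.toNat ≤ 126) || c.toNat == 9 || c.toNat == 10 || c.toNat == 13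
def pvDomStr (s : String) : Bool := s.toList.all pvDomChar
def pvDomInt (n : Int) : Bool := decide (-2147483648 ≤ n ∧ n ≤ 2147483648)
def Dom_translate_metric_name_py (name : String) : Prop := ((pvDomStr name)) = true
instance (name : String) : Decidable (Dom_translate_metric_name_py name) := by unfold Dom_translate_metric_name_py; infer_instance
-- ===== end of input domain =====

-- B replaces A's dict + word-by-word underscore loop by a flat equality chain:
-- every dict key contains '_', so A's per-word loop never translates a token.

-- ===== PORT A =====
-- the translations dict literal of A
def pvTranslations : PySem.Dict String String := PySem.Dict.ofList
  [ ("total_cost", "coût_total"),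
    ("payback_period", "période_de_retour"),
    ("operating_costs", "coûts_exploitation"),
    ("break_even_point", "seuil_de_rentabilité"),
    ("return_on_investment", "retour_sur_investissement"),
    ("estimated_increase_in_revenue", "augmentation_estimée_revenus"),
    ("estimated_increase_in_production", "augmentation_estimée_production"),
    ("cash_impact", "impact_trésorerie"),
    ("gain_mensuel", "gain_mensuel"),
    ("coût_mensuel", "coût_mensuel") ]

def translate_metric_name_py (name : String) : String :=
  let translations := pvTranslations
  -- translations[name] guarded by 'name in translations': getD is exact here
  if PySem.Dict.contains translations name then PySem.Dict.getD translations name name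
  else if PySem.Str.isIn "_" name then
    -- name.split("_"): sep nonempty, so Chars.splitOn is exact
    let parts : List String := (PySem.Chars.splitOn name.toList ['_']).map String.ofList
    let translated_parts : List String := parts.foldl
      (fun acc part =>
        if PySem.Dict.contains translations part then
          acc ++ [PySem.Dict.getD translations part part]
        else acc ++ [part]) []
    PySem.Str.join "_" translated_parts
  else name

-- ===== PORT B =====
-- flat if/elif equality chain of Source B, no dictionary
def translate_metric_name_py_alt (name : String) : String :=
  if name = "total_cost" then "coût_total"
  else if name = "payback_period" then "période_de_retour"
  else if name = "operating_costs" then "coûts_exploitation"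
  else if name = "break_even_point" then "seuil_de_rentabilité"
  else if name = "return_on_investment" then "retour_sur_investissement"
  else if name = "estimated_increase_in_revenue" then "augmentation_estimée_revenus"
  else if name = "estimated_increase_in_production" then "augmentation_estimée_production"
  else if name = "cash_impact" then "impact_trésorerie"
  else name

-- ===== PRECONDITION & SPEC =====
def Spec_translate_metric_name_py (name : String) (out : String) : Prop := out = translate_metric_name_py_alt name
instance (name : String) (out : String) : Decidable (Spec_translate_metric_name_py name out) := by unfold Spec_translate_metric_name_py; infer_instance

-- ===== CLAIM (what is proved, stated in full; the proofs are below) =====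
def Claim_equal_translate_metric_name_py : Prop := ∀ (name : String), Dom_translate_metric_name_py name → Spec_translate_metric_name_py name (translate_metric_name_py name)

-- ===== LEMMAS AND PROOFS =====

-- splitOn.go distributes over its accumulator
theorem pv_go_acc (sep : List Char) (fuel : Nat) (l cur : List Char) (acc : List (List Char)) :
    PySem.Chars.splitOn.go sep fuel l cur acc = acc.reverse ++ PySem.Chars.splitOn.go sep fuel l cur [] := by
  induction fuel generalizing l cur acc with
  | zero => simp [PySem.Chars.splitOn.go]
  | succ n ih =>
    cases l with
    | nil => simp [PySem.Chars.splitOn.go]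
    | cons c rest =>
      rw [PySem.Chars.splitOn.go.eq_def]
      conv_rhs => rw [PySem.Chars.splitOn.go.eq_def]
      simp only
      split_ifs with h
      · rw [ih _ _ (cur.reverse :: acc), ih _ _ ([cur.reverse])]
        simp
      · exact ih _ _ acc

theorem pv_go_ne_nil (sep : List Char) (fuel : Nat) (l cur : List Char) (acc : List (List Char)) :
    PySem.Chars.splitOn.go sep fuel l cur acc ≠ [] := by
  induction fuel generalizing l cur acc with
  | zero => simp [PySem.Chars.splitOn.go]
  | succ n ih =>
    cases l with
    | nil => simp [PySem.Chars.splitOn.go]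
    | cons c rest =>
      rw [PySem.Chars.splitOn.go.eq_def]
      simp only
      split_ifs with h
      · exact ih _ _ _
      · exact ih _ _ _

-- joining the pieces of go with the single-char separator restores the input
theorem pv_go_join (fuel : Nat) (l cur : List Char) (h : l.length < fuel) :
    PySem.Chars.join ['_'] (PySem.Chars.splitOn.go ['_'] fuel l cur []) = cur.reverse ++ l := by
  induction fuel generalizing l cur with
  | zero => omega
  | succ n ih =>
    cases l with
    | nil => simp [PySem.Chars.splitOn.go, PySem.Chars.join, List.intercalate]
    | cons c rest =>
      rw [PySem.Chars.splitOn.go.eq_def]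
      simp only
      split_ifs with hpre
      · have hc : c = '_' := by
          simp [List.isPrefixOf] at hpre; exact hpre.symm
        subst hc
        rw [pv_go_acc]
        simp only [List.reverse_cons, List.reverse_nil, List.nil_append, List.length_cons,
          List.drop_succ_cons, List.length_nil, List.drop_zero]
        obtain ⟨q, qs, hq⟩ : ∃ q qs, PySem.Chars.splitOn.go ['_'] n rest [] [] = q :: qs := by
          cases hgo : PySem.Chars.splitOn.go ['_'] n rest [] [] with
          | nil => exact absurd hgo (pv_go_ne_nil _ _ _ _ _)
          | cons q qs => exact ⟨q, qs, rfl⟩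
        have hrest : PySem.Chars.join ['_'] (q :: qs) = rest := by
          rw [← hq]; simpa using ih rest [] (by simpa using Nat.lt_of_succ_lt_succ h)
        rw [hq, List.singleton_append, PySem.Chars.join_cons_cons]
        simp [hrest]
      · rw [ih rest (c :: cur) (by simpa using Nat.lt_of_succ_lt_succ h)]
        simp

-- no piece produced by go contains the separator character
theorem pv_go_mem (fuel : Nat) (l cur : List Char) (acc : List (List Char)) (p : List Char)
    (hf : l.length < fuel) (hcur : '_' ∉ cur) (hacc : ∀ q ∈ acc, '_' ∉ q)
    (hp : p ∈ PySem.Chars.splitOn.go ['_'] fuel l cur acc) : '_' ∉ p := by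
  induction fuel generalizing l cur acc with
  | zero => omega
  | succ n ih =>
    cases l with
    | nil =>
      rw [PySem.Chars.splitOn.go.eq_def] at hp
      simp only [List.reverse_cons] at hp
      rcases List.mem_append.mp hp with h1 | h1
      · exact hacc p (List.mem_reverse.mp h1)
      · have : p = cur.reverse := List.mem_singleton.mp h1
        subst this; simpa using hcur
    | cons c rest =>
      rw [PySem.Chars.splitOn.go.eq_def] at hp
      simp only at hp
      split_ifs at hp with hpre
      · refine ih rest [] (cur.reverse :: acc) ?_ (by simp) ?_ (by simpa using hp)
        · simp at hf ⊢; omega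
        · intro q hq
          rcases List.mem_cons.mp hq with h1 | h1
          · subst h1; simpa using hcur
          · exact hacc q h1
      · have hc : c ≠ '_' := by
          intro hc; subst hc; simp [List.isPrefixOf] at hpre
        refine ih rest (c :: cur) acc (by simp at hf ⊢; omega) ?_ hacc hp
        intro hmem
        rcases List.mem_cons.mp hmem with h1 | h1
        · exact hc h1.symm
        · exact hcur h1

-- the items of the translations dict literal
theorem pv_items : pvTranslations.items =
    [ ("total_cost", "coût_total"),
      ("payback_period", "période_de_retour"),
      ("operating_costs", "coûts_exploitation"),
      ("break_even_point", "seuil_de_rentabilité"),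
      ("return_on_investment", "retour_sur_investissement"),
      ("estimated_increase_in_revenue", "augmentation_estimée_revenus"),
      ("estimated_increase_in_production", "augmentation_estimée_production"),
      ("cash_impact", "impact_trésorerie"),
      ("gain_mensuel", "gain_mensuel"),
      ("coût_mensuel", "coût_mensuel") ] := by decide

-- every key of the translations dict contains an underscore
theorem pv_contains_mem (s : String) (h : PySem.Dict.contains pvTranslations s = true) :
    '_' ∈ s.toList := by
  simp only [PySem.Dict.contains, pv_items, List.any_cons, List.any_nil, Bool.or_eq_true,
    Bool.or_false, beq_iff_eq] at h
  rcases h with h|h|h|h|h|h|h|h|h|h <;> (subst h; decide)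

-- the dict does not contain any string without an underscore
theorem pv_not_contains (s : String) (h : '_' ∉ s.toList) :
    PySem.Dict.contains pvTranslations s = false := by
  cases hc : PySem.Dict.contains pvTranslations s with
  | false => rfl
  | true => exact absurd (pv_contains_mem s hc) h

theorem pv_getD_of_not_contains (s d : String) (h : PySem.Dict.contains pvTranslations s = false) :
    PySem.Dict.getD pvTranslations s d = d := by
  simp only [PySem.Dict.getD, PySem.Dict.get?]
  simp only [PySem.Dict.contains] at h
  have hnone : List.find? (fun p => p.1 == s) pvTranslations.items = none := by
    rw [List.find?_eq_none]
    intro p hp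
    have := List.any_eq_false.mp h p hp
    simpa using this
  simp [hnone]

-- A's dict lookup (with default) coincides with B's flat equality chain
theorem pv_getD_eq_alt (name : String) :
    PySem.Dict.getD pvTranslations name name = translate_metric_name_py_alt name := by
  by_cases h1 : name = "total_cost"; · subst h1; decide
  by_cases h2 : name = "payback_period"; · subst h2; decide
  by_cases h3 : name = "operating_costs"; · subst h3; decide
  by_cases h4 : name = "break_even_point"; · subst h4; decide
  by_cases h5 : name = "return_on_investment"; · subst h5; decide
  by_cases h6 : name = "estimated_increase_in_revenue"; · subst h6; decide
  by_cases h7 : name = "estimated_increase_in_production"; · subst h7; decide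
  by_cases h8 : name = "cash_impact"; · subst h8; decide
  by_cases h9 : name = "gain_mensuel"; · subst h9; decide
  by_cases h10 : name = "coût_mensuel"; · subst h10; decide
  have hc : PySem.Dict.contains pvTranslations name = false := by
    simp only [PySem.Dict.contains, pv_items, List.any_cons, List.any_nil, Bool.or_false]
    simp only [Bool.or_eq_false_iff]
    refine ⟨?_,?_,?_,?_,?_,?_,?_,?_,?_,?_⟩ <;> rw [beq_eq_false_iff_ne] <;>
      first
      | exact fun h => h1 h.symm | exact fun h => h2 h.symm | exact fun h => h3 h.symm
      | exact fun h => h4 h.symm | exact fun h => h5 h.symm | exact fun h => h6 h.symm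
      | exact fun h => h7 h.symm | exact fun h => h8 h.symm | exact fun h => h9 h.symm
      | exact fun h => h10 h.symm
  rw [pv_getD_of_not_contains name name hc]
  unfold translate_metric_name_py_alt
  rw [if_neg h1, if_neg h2, if_neg h3, if_neg h4, if_neg h5, if_neg h6, if_neg h7, if_neg h8]

-- ===== VERDICT (by name: the statement is the Claim_ definition above) =====
theorem translate_metric_name_py_spec : Claim_equal_translate_metric_name_py := by
  unfold Claim_equal_translate_metric_name_py
  intro name _
  unfold Spec_translate_metric_name_py translate_metric_name_py
  rw [← pv_getD_eq_alt]
  simp only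
  by_cases hc : PySem.Dict.contains pvTranslations name = true
  · simp [hc]
  · have hcf : PySem.Dict.contains pvTranslations name = false := by
      cases h : PySem.Dict.contains pvTranslations name
      · rfl
      · exact absurd h hc
    rw [if_neg (by simp [hcf])]
    rw [pv_getD_of_not_contains name name hcf]
    by_cases hu : PySem.Str.isIn "_" name = true
    · rw [if_pos hu]
      have hparts : ∀ q ∈ PySem.Chars.splitOn name.toList ['_'], '_' ∉ q := by
        intro q hq
        unfold PySem.Chars.splitOn at hq
        exact pv_go_mem _ _ _ _ q (Nat.lt_succ_self _) (by simp) (by simp) hq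
      have hbody : (fun (acc : List String) (part : String) =>
          if PySem.Dict.contains pvTranslations part then
            acc ++ [PySem.Dict.getD pvTranslations part part]
          else acc ++ [part])
          = fun acc part => acc ++ [if PySem.Dict.contains pvTranslations part then
              PySem.Dict.getD pvTranslations part part else part] := by
        funext acc part; split_ifs <;> rfl
      rw [hbody, PySem.List.foldl_append_singleton_eq_map]
      have hmap : List.map (fun part => if PySem.Dict.contains pvTranslations part then
            PySem.Dict.getD pvTranslations part part else part)
          ((PySem.Chars.splitOn name.toList ['_']).map String.ofList)
          = (PySem.Chars.splitOn name.toList ['_']).map String.ofList := by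
        rw [List.map_map]
        apply List.map_congr_left
        intro q hq
        have : PySem.Dict.contains pvTranslations (String.ofList q) = false := by
          apply pv_not_contains
          rw [String.toList_ofList]
          exact hparts q hq
        simp [Function.comp, this]
      rw [hmap]
      simp only [PySem.Str.join, List.nil_append, List.map_map]
      have : List.map (String.toList ∘ String.ofList) (PySem.Chars.splitOn name.toList ['_'])
          = PySem.Chars.splitOn name.toList ['_'] := by
        exact (List.map_congr_left (fun q _ => by
          simp [Function.comp, String.toList_ofList])).trans (List.map_id _)
      rw [this]
      have hjoin : PySem.Chars.join "_".toList (PySem.Chars.splitOn name.toList ['_'])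
          = name.toList := by
        show PySem.Chars.join ['_'] _ = _
        unfold PySem.Chars.splitOn
        simpa using pv_go_join (name.toList.length + 1) name.toList [] (Nat.lt_succ_self _)
      rw [hjoin, String.ofList_toList]
    · rw [if_neg hu]
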